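-- pv_equiv track=rewrite | github.com/riddledc/integrations | packages/riddle-proof/runtime/lib/implement.py | parse_status_paths
-- ===== SOURCE A (Python) =====
-- def unique_nonempty(items):
--     seen = set()
--     values = []
--     for item in items:
--         text = str(item or '').strip()
--         if not text or text in seen:
--             continue
--         seen.add(text)
--         values.append(text)
--     return values
--
-- def parse_status_paths(lines):
--     paths = []
--     for line in lines:
--         text = str(line or '').rstrip()
--         if not text:
--             continue
--         path = text[3:] if len(text) > 3 else text
--         if ' -> ' in path:
--             path = path.split(' -> ', 1)[1]
--         path = path.strip()
--         if path:
--             paths.append(path)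
--     return unique_nonempty(paths)
-- ===== SOURCE B (Python) =====
-- def parse_status_paths(lines):
--     seen = set()
--     result = []
--     for line in lines:
--         text = str(line or '').rstrip()
--         if not text:
--             continue
--         path = text[3:] if len(text) > 3 else text
--         if ' -> ' in path:
--             path = path.split(' -> ', 1)[1]
--         path = path.strip()
--         if path and path not in seen:
--             seen.add(path)
--             result.append(path)
--     return result
-- ===== Notes on version B (the rewrite author's own statement) =====
-- stated objective: simpler
-- what changed: Fused parse and dedup into one traversal with an inline seen-set, removing the intermediate paths list and the separate unique_nonempty helper/pass (whose re-strip and emptiness re-check are redundant on already-stripped non-empty paths).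
import Mathlib
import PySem

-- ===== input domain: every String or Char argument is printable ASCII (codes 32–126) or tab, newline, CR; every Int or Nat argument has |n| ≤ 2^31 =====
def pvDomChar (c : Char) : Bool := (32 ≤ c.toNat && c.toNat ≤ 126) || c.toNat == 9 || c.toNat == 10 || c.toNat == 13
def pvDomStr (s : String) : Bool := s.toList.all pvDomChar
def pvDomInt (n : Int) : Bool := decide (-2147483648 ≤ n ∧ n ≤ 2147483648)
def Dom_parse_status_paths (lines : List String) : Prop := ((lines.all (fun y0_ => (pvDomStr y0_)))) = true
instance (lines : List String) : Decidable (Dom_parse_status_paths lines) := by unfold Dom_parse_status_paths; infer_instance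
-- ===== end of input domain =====

-- B fuses A's parse pass and its separate unique_nonempty dedup pass into one traversal
-- with an inline seen-set (objective: simpler — no intermediate list, no helper).

-- ===== PORT A =====
-- helper: unique_nonempty(items); on strings, Python's `item or ''` is item itself (str of a string is identity)
def unique_nonempty (items : List String) : List String :=
  (items.foldl (fun (st : PySem.Set String × List String) item =>
    let text := PySem.Str.strip item
    if PySem.Str.len text == 0 || PySem.Set.contains st.1 text then st
    else (PySem.Set.add st.1 text, st.2 ++ [text])) (PySem.Set.empty, [])).2

def parse_status_paths (lines : List String) : List String :=
  unique_nonempty (lines.foldl (fun paths line =>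
    let text := PySem.Str.rstrip line
    if PySem.Str.len text == 0 then paths
    else
      let path := if 3 < PySem.Str.len text then PySem.Str.slice text (some 3) none else text
      let path := if PySem.Str.isIn " -> " path then
          -- path.split(' -> ', 1)[1]: index 1 exists because ' -> ' occurs in path
          PySem.List.pyGetD ((PySem.Str.splitMax? path " -> " 1).getD []) 1 ""
        else path
      let path := PySem.Str.strip path
      if PySem.Str.len path == 0 then paths else paths ++ [path]) [])

-- ===== PORT B =====
def parse_status_paths_alt (lines : List String) : List String :=
  (lines.foldl (fun (st : PySem.Set String × List String) line =>
    let text := PySem.Str.rstrip line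
    if PySem.Str.len text == 0 then st
    else
      let path := if 3 < PySem.Str.len text then PySem.Str.slice text (some 3) none else text
      let path := if PySem.Str.isIn " -> " path then
          PySem.List.pyGetD ((PySem.Str.splitMax? path " -> " 1).getD []) 1 ""
        else path
      let path := PySem.Str.strip path
      if PySem.Str.len path == 0 || PySem.Set.contains st.1 path then st
      else (PySem.Set.add st.1 path, st.2 ++ [path])) (PySem.Set.empty, [])).2

-- ===== PRECONDITION & SPEC =====
def Spec_parse_status_paths (lines : List String) (out : List String) : Prop := out = parse_status_paths_alt lines
instance (lines : List String) (out : List String) : Decidable (Spec_parse_status_paths lines out) := by unfold Spec_parse_status_paths; infer_instance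

-- ===== CLAIM (what is proved, stated in full; the proofs are below) =====
def Claim_equal_parse_status_paths : Prop := ∀ (lines : List String), Dom_parse_status_paths lines → Spec_parse_status_paths lines (parse_status_paths lines)

-- ===== LEMMAS AND PROOFS =====

-- what A's first pass contributes for one line: [] or a single stripped non-empty path
def pvKeep (line : String) : List String :=
  let text := PySem.Str.rstrip line
  if PySem.Str.len text == 0 then []
  else
    let path := if 3 < PySem.Str.len text then PySem.Str.slice text (some 3) none else text
    let path := if PySem.Str.isIn " -> " path then
        PySem.List.pyGetD ((PySem.Str.splitMax? path " -> " 1).getD []) 1 ""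
      else path
    let path := PySem.Str.strip path
    if PySem.Str.len path == 0 then [] else [path]

lemma dropWhile_prefix_of_fix {p : Char → Bool} {l r : List Char}
    (hl : List.dropWhile p l = l) (hr : r <+: l) : List.dropWhile p r = r := by
  cases r with
  | nil => simp
  | cons a t =>
    obtain ⟨rest, hrest⟩ := hr
    have hpa : p a = false := by
      by_contra h
      have h' : p a = true := by simpa using h
      rw [← hrest, List.cons_append, List.dropWhile_cons_of_pos h'] at hl
      have h1 := List.length_dropWhile_le p (t ++ rest)
      have h2 := congrArg List.length hl
      simp at h1 h2; omega
    simp [hpa]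

lemma chars_strip_strip (cs : List Char) :
    PySem.Chars.strip (PySem.Chars.strip cs) = PySem.Chars.strip cs := by
  simp only [PySem.Chars.strip, PySem.Chars.lstrip, PySem.Chars.rstrip]
  set p := PySem.Chars.isspace
  set l := List.dropWhile p cs with hl
  have hidl : List.dropWhile p l = l := List.dropWhile_idempotent p cs
  set r := (List.dropWhile p l.reverse).reverse with hr
  have hpre : r <+: l := by
    have h2 := (List.dropWhile_suffix (l := l.reverse) p).reverse
    rwa [List.reverse_reverse] at h2
  have h1 : List.dropWhile p r = r := dropWhile_prefix_of_fix hidl hpre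
  rw [h1, hr, List.reverse_reverse, List.dropWhile_idempotent]

lemma str_strip_strip (s : String) :
    PySem.Str.strip (PySem.Str.strip s) = PySem.Str.strip s := by
  simp [PySem.Str.strip, chars_strip_strip]

lemma append_keep (paths : List String) (c1 c2 : Bool) (P : String) :
    (if c1 then paths else if c2 then paths else paths ++ [P])
      = paths ++ (if c1 then [] else if c2 then [] else [P]) := by
  cases c1 <;> cases c2 <;> simp

lemma fused_step (st : PySem.Set String × List String) (c1 : Bool) (P : String)
    (hP : PySem.Str.strip P = P) :
    (if c1 then st
     else if PySem.Str.len P == 0 || PySem.Set.contains st.1 P then st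
     else (PySem.Set.add st.1 P, st.2 ++ [P]))
    = (if c1 then ([] : List String) else if PySem.Str.len P == 0 then [] else [P]).foldl
        (fun (st : PySem.Set String × List String) item =>
          let text := PySem.Str.strip item
          if PySem.Str.len text == 0 || PySem.Set.contains st.1 text then st
          else (PySem.Set.add st.1 text, st.2 ++ [text])) st := by
  cases c1
  · simp only [Bool.false_eq_true, if_false]
    by_cases h : (PySem.Str.len P == 0) = true
    · simp only [h, Bool.true_or, if_pos, List.foldl_nil]
    · simp only [h, Bool.false_eq_true, if_false, List.foldl_cons, List.foldl_nil]
      rw [hP]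
      simp only [h, Bool.false_or]
  · simp only [if_true, List.foldl_nil]

-- A's first pass, started from any accumulator, is acc ++ flatMap pvKeep
set_option maxHeartbeats 1000000 in
lemma afold_eq (lines : List String) (acc : List String) :
    lines.foldl (fun paths line =>
      let text := PySem.Str.rstrip line
      if PySem.Str.len text == 0 then paths
      else
        let path := if 3 < PySem.Str.len text then PySem.Str.slice text (some 3) none else text
        let path := if PySem.Str.isIn " -> " path then
            PySem.List.pyGetD ((PySem.Str.splitMax? path " -> " 1).getD []) 1 ""
          else path
        let path := PySem.Str.strip path
        if PySem.Str.len path == 0 then paths else paths ++ [path]) acc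
    = acc ++ lines.flatMap pvKeep := by
  have h : (fun (paths : List String) line =>
      let text := PySem.Str.rstrip line
      if PySem.Str.len text == 0 then paths
      else
        let path := if 3 < PySem.Str.len text then PySem.Str.slice text (some 3) none else text
        let path := if PySem.Str.isIn " -> " path then
            PySem.List.pyGetD ((PySem.Str.splitMax? path " -> " 1).getD []) 1 ""
          else path
        let path := PySem.Str.strip path
        if PySem.Str.len path == 0 then paths else paths ++ [path])
      = fun paths line => paths ++ pvKeep line := by
    funext paths line
    simp only [pvKeep]
    exact append_keep paths _ _ _
  rw [h, PySem.List.foldl_append_eq_flatMap]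

-- the fused loop equals unique_nonempty's loop run over the parsed paths
set_option maxHeartbeats 1000000 in
lemma main_fold (lines : List String) :
    ∀ (st : PySem.Set String × List String),
    lines.foldl (fun (st : PySem.Set String × List String) line =>
      let text := PySem.Str.rstrip line
      if PySem.Str.len text == 0 then st
      else
        let path := if 3 < PySem.Str.len text then PySem.Str.slice text (some 3) none else text
        let path := if PySem.Str.isIn " -> " path then
            PySem.List.pyGetD ((PySem.Str.splitMax? path " -> " 1).getD []) 1 ""
          else path
        let path := PySem.Str.strip path
        if PySem.Str.len path == 0 || PySem.Set.contains st.1 path then st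
        else (PySem.Set.add st.1 path, st.2 ++ [path])) st
    = (lines.flatMap pvKeep).foldl (fun (st : PySem.Set String × List String) item =>
        let text := PySem.Str.strip item
        if PySem.Str.len text == 0 || PySem.Set.contains st.1 text then st
        else (PySem.Set.add st.1 text, st.2 ++ [text])) st := by
  induction lines with
  | nil => intro st; rfl
  | cons l ls ih =>
    intro st
    simp only [List.foldl_cons, List.flatMap_cons, List.foldl_append]
    rw [ih]
    congr 1
    simp only [pvKeep]
    exact fused_step st _ _ (str_strip_strip _)

-- ===== VERDICT (by name: the statement is the Claim_ definition above) =====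
theorem parse_status_paths_spec : Claim_equal_parse_status_paths := by
  intro lines _
  show parse_status_paths lines = parse_status_paths_alt lines
  unfold parse_status_paths parse_status_paths_alt unique_nonempty
  rw [afold_eq, List.nil_append, main_fold]
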